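-- pv_equiv track=rewrite | github.com/NiveKian/LeetCode30Py | ZeroOne.py | findZeroOne
-- ===== SOURCE A (Python) =====
-- def findZeroOne(X):
--
--   best = 0
--   temp = 0
--
--   for i,n in enumerate(X):
--     # Build the verificaition variables
--     last = None if i == 0 else X[i-1]
--     next = None if i == len(X)-1 else X[i+1]
--     valid = True if (n != last) and (n != next) else False
--
--     # validate the variables
--     if valid:
--       temp += 1
--     else:
--       if temp > best: best = temp
--       temp = 0
--
--   if temp > best: best = temp
--
--   return best
-- ===== SOURCE B (Python) =====
-- def findZeroOne(X):
--     # Phase 1: precompute, for every position, whether it differs from both neighbors.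
--     n = len(X)
--     valid = [(i == 0 or X[i] != X[i - 1]) and (i == n - 1 or X[i] != X[i + 1])
--              for i in range(n)]
--     # Phase 2: run-length encode the validity table, answer = longest True run.
--     return max((c for k, c in _rle(valid) if k), default=0)
--
--
-- def _rle(bits):
--     """Run-length encoding of a list of booleans."""
--     if not bits:
--         return []
--     runs = []
--     k, c = bits[0], 1
--     for v in bits[1:]:
--         if v == k:
--             c += 1
--         else:
--             runs.append((k, c))
--             k, c = v, 1
--     runs.append((k, c))
--     return runs
-- ===== Notes on version B (the rewrite author's own statement) =====
-- stated objective: alternative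
-- what changed: A's single interleaved pass (validity computed and counted in one loop with best/temp state) is replaced by two separated phases: precompute a boolean validity table, run-length encode it, and take the max length of the True runs.
import Mathlib
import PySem

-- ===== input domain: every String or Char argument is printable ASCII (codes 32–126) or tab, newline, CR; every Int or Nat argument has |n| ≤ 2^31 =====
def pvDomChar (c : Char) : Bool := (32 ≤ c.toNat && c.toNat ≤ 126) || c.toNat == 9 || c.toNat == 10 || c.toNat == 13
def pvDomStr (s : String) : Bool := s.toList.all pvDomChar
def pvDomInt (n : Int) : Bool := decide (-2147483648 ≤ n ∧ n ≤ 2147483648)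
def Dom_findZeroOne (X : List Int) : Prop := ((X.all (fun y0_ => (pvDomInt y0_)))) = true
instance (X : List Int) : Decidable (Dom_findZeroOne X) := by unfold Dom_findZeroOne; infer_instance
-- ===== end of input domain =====

-- B replaces A's single interleaved pass by a precomputed validity table followed by a
-- run-length-encoding scan (objective: alternative decomposition, same cost, not faster).

-- ===== PORT A =====
-- Python's 'None if i == 0 else X[i-1]' is ported as Option Int ('none' = None);
-- 'n != last' is 'some n ≠ last' (an int is never equal to None, matching Python).
def findZeroOne (X : List Int) : Int :=
  let step : Int × Int → Int × Int → Int × Int := fun st p =>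
    let last : Option Int := if p.1 = 0 then none else PySem.List.pyGet? X (p.1 - 1)
    let next : Option Int := if p.1 = (X.length : Int) - 1 then none else PySem.List.pyGet? X (p.1 + 1)
    let valid : Bool := if some p.2 ≠ last ∧ some p.2 ≠ next then true else false
    if valid then (st.1, st.2 + 1)
    else (if st.2 > st.1 then (st.2, 0) else (st.1, 0))
  let r := (PySem.List.enumerate X).foldl step (0, 0)
  if r.2 > r.1 then r.2 else r.1

-- ===== PORT B =====
-- the loop body of _rle ('for v in bits[1:]')
def pvRleStep (st : List (Bool × Int) × Bool × Int) (v : Bool) : List (Bool × Int) × Bool × Int :=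
  if v = st.2.1 then (st.1, st.2.1, st.2.2 + 1)
  else (st.1 ++ [(st.2.1, st.2.2)], v, 1)

-- _rle(bits): run-length encoding of a boolean list
def pvRle : List Bool → List (Bool × Int)
  | [] => []
  | b :: rest =>
    let r := rest.foldl pvRleStep ([], b, 1)
    r.1 ++ [(r.2.1, r.2.2)]

-- the validity-table comprehension; every index B actually reads is in range
-- (guarded by the short-circuited 'i == 0' / 'i == n-1'), so pyGetD with default 0 is exact
def pvValid (X : List Int) : List Bool :=
  (PySem.List.pyRange 0 (X.length) 1).map (fun i =>
    (decide (i = 0) || decide (PySem.List.pyGetD X i 0 ≠ PySem.List.pyGetD X (i - 1) 0)) &&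
    (decide (i = (X.length : Int) - 1) || decide (PySem.List.pyGetD X i 0 ≠ PySem.List.pyGetD X (i + 1) 0)))

-- max(c for k, c in _rle(valid) if k), default=0
def findZeroOne_alt (X : List Int) : Int :=
  ((pvRle (pvValid X)).filterMap (fun p => if p.1 then some p.2 else none)).foldl max 0

-- ===== PRECONDITION & SPEC =====
def Spec_findZeroOne (X : List Int) (out : Int) : Prop := out = findZeroOne_alt X
instance (X : List Int) (out : Int) : Decidable (Spec_findZeroOne X out) := by unfold Spec_findZeroOne; infer_instance

-- ===== CLAIM (what is proved, stated in full; the proofs are below) =====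
def Claim_equal_findZeroOne : Prop := ∀ (X : List Int), Dom_findZeroOne X → Spec_findZeroOne X (findZeroOne X)

-- ===== LEMMAS AND PROOFS =====

-- the per-position validity bool A computes at pair (i, n)
def pvVA (X : List Int) (i n : Int) : Bool :=
  if some n ≠ (if i = 0 then none else PySem.List.pyGet? X (i - 1)) ∧
     some n ≠ (if i = (X.length : Int) - 1 then none else PySem.List.pyGet? X (i + 1))
  then true else false

-- A's loop step, abstracted over the validity bool
def pvG (st : Int × Int) (v : Bool) : Int × Int :=
  if v then (st.1, st.2 + 1) else (if st.2 > st.1 then (st.2, 0) else (st.1, 0))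

-- longest run of `true`, with t the length of the current (open) run
def pvH : Int → List Bool → Int
  | t, [] => t
  | t, true :: rest => pvH (t + 1) rest
  | t, false :: rest => max t (pvH 0 rest)

-- the lengths of the `true` runs
def pvTrueLens (rs : List (Bool × Int)) : List Int :=
  rs.filterMap (fun p => if p.1 then some p.2 else none)

theorem pv_ite_tf (p : Prop) [Decidable p] : (if p then true else false) = decide p := by
  by_cases h : p <;> simp [h]

theorem pvH_le (l : List Bool) : ∀ t : Int, t ≤ pvH t l := by
  induction l with
  | nil => intro t; simp [pvH]
  | cons b rest ih =>
    intro t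
    cases b
    · simp [pvH]
    · simpa [pvH] using le_trans (by omega) (ih (t + 1))

-- A's loop followed by its final 'if temp > best' computes max best (pvH temp valids)
theorem pvG_finalize (l : List Bool) : ∀ b t : Int,
    (let r := l.foldl pvG (b, t); if r.2 > r.1 then r.2 else r.1) = max b (pvH t l) := by
  induction l with
  | nil => intro b t; simp only [List.foldl_nil, pvH]; omega
  | cons v rest ih =>
    intro b t
    cases v
    · simp only [List.foldl_cons, pvG, if_false, Bool.false_eq_true, pvH]
      split
      · rw [ih]
        have := pvH_le rest 0
        omega
      · rw [ih]
        have := pvH_le rest 0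
        omega
    · simpa only [List.foldl_cons, pvG, if_true, pvH] using ih b (t + 1)

theorem findZeroOne_eq_fold (X : List Int) :
    findZeroOne X = max 0 (pvH 0 ((PySem.List.enumerate X).map (fun p => pvVA X p.1 p.2))) := by
  have h1 : findZeroOne X =
      (let r := ((PySem.List.enumerate X).map (fun p => pvVA X p.1 p.2)).foldl pvG (0, 0);
       if r.2 > r.1 then r.2 else r.1) := by
    rw [List.foldl_map]; rfl
  rw [h1, pvG_finalize]

-- the validity bits A computes on the fly are exactly B's precomputed table
theorem pvValid_eq (X : List Int) :
    (PySem.List.enumerate X).map (fun p => pvVA X p.1 p.2) = pvValid X := by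
  apply List.ext_getElem
  · simp [pvValid, PySem.List.length_enumerate, PySem.List.length_pyRange_one]
  · intro k h1 h2
    have hk : k < X.length := by simpa [PySem.List.length_enumerate] using h1
    simp only [List.getElem_map, PySem.List.getElem_enumerate, pvValid,
      PySem.List.getElem_pyRange_one, zero_add, pvVA]
    have hXk : PySem.List.pyGetD X (k : Int) 0 = X[k] := by
      rw [PySem.List.pyGetD_eq_getElem X 0 (by omega) (by omega)]
      simp
    have hfst : (some X[k] ≠ if (k : Int) = 0 then none else PySem.List.pyGet? X ((k : Int) - 1)) ↔
        ((k : Int) = 0 ∨ PySem.List.pyGetD X (k : Int) 0 ≠ PySem.List.pyGetD X ((k : Int) - 1) 0) := by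
      by_cases h0 : (k : Int) = 0
      · simp [h0]
      · have h0n : ¬ (k = 0) := by omega
        have e1 : PySem.List.pyGet? X ((k : Int) - 1) = some X[k - 1] := by
          rw [PySem.List.pyGet?_eq_some_getElem X (by omega) (by omega)]
          simp only [show ((k : Int) - 1).toNat = k - 1 by omega]
        have e2 : PySem.List.pyGetD X ((k : Int) - 1) 0 = X[k - 1] := by
          rw [PySem.List.pyGetD_eq_getElem X 0 (by omega) (by omega)]
          simp only [show ((k : Int) - 1).toNat = k - 1 by omega]
        rw [if_neg h0, e1, hXk, e2]
        simp [h0n]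
    have hsnd : (some X[k] ≠ if (k : Int) = (X.length : Int) - 1 then none else PySem.List.pyGet? X ((k : Int) + 1)) ↔
        ((k : Int) = (X.length : Int) - 1 ∨ PySem.List.pyGetD X (k : Int) 0 ≠ PySem.List.pyGetD X ((k : Int) + 1) 0) := by
      by_cases hL : (k : Int) = (X.length : Int) - 1
      · simp [hL]
      · have hlt : k + 1 < X.length := by omega
        have e3 : PySem.List.pyGet? X ((k : Int) + 1) = some X[k + 1] := by
          rw [PySem.List.pyGet?_eq_some_getElem X (by omega) (by omega)]
          simp only [show ((k : Int) + 1).toNat = k + 1 by omega]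
        have e4 : PySem.List.pyGetD X ((k : Int) + 1) 0 = X[k + 1] := by
          rw [PySem.List.pyGetD_eq_getElem X 0 (by omega) (by omega)]
          simp only [show ((k : Int) + 1).toNat = k + 1 by omega]
        rw [if_neg hL, e3, hXk, e4]
        simp [hL]
    rw [pv_ite_tf]
    apply Bool.eq_iff_iff.mpr
    simp only [Bool.and_eq_true, Bool.or_eq_true, decide_eq_true_eq]
    exact and_congr hfst hsnd

-- the running max over the true-run lengths of B's RLE equals pvH
theorem pvRle_fold (rest : List Bool) : ∀ (runs : List (Bool × Int)) (k : Bool) (c acc : Int),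
    0 ≤ acc →
    (pvTrueLens ((rest.foldl pvRleStep (runs, k, c)).1 ++
        [((rest.foldl pvRleStep (runs, k, c)).2.1, (rest.foldl pvRleStep (runs, k, c)).2.2)])).foldl max acc
      = max ((pvTrueLens runs).foldl max acc) (if k then pvH c rest else pvH 0 rest) := by
  induction rest with
  | nil =>
    intro runs k c acc hacc
    have hA : acc ≤ (pvTrueLens runs).foldl max acc := (PySem.List.le_foldl_max _ _).1
    cases k <;>
      simp only [List.foldl_nil, pvTrueLens, List.filterMap_append, List.foldl_append,
        List.filterMap_cons, List.filterMap_nil, if_true, if_false, List.foldl_cons, pvH] <;>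
      simp_all [pvTrueLens] <;> omega
  | cons v rest ih =>
    intro runs k c acc hacc
    have hA : acc ≤ (pvTrueLens runs).foldl max acc := (PySem.List.le_foldl_max _ _).1
    have h0 := pvH_le rest 0
    cases v <;> cases k <;>
      simp only [List.foldl_cons, pvRleStep, if_true, if_false, decide_true, decide_false,
        Bool.true_eq_false, Bool.false_eq_true, reduceIte, pvH] <;>
      rw [ih _ _ _ _ hacc] <;>
      simp only [pvTrueLens, List.filterMap_append, List.filterMap_cons, List.filterMap_nil,
        if_true, if_false, List.foldl_append, List.foldl_cons, List.foldl_nil] <;>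
      simp_all [pvTrueLens] <;> omega

theorem alt_eq_pvH (X : List Int) : findZeroOne_alt X = pvH 0 (pvValid X) := by
  show (pvTrueLens (pvRle (pvValid X))).foldl max 0 = _
  cases hv : pvValid X with
  | nil => simp [pvRle, pvTrueLens, pvH]
  | cons b rest =>
    show (pvTrueLens ((rest.foldl pvRleStep ([], b, 1)).1 ++
        [((rest.foldl pvRleStep ([], b, 1)).2.1, (rest.foldl pvRleStep ([], b, 1)).2.2)])).foldl max 0 = _
    rw [pvRle_fold rest [] b 1 0 (le_refl 0)]
    have h1 := pvH_le rest 1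
    have h0 := pvH_le rest 0
    cases b <;> simp [pvTrueLens, pvH] <;> omega

-- ===== VERDICT (by name: the statement is the Claim_ definition above) =====
theorem findZeroOne_spec : Claim_equal_findZeroOne := by
  intro X _
  show findZeroOne X = findZeroOne_alt X
  rw [findZeroOne_eq_fold, pvValid_eq, alt_eq_pvH]
  have := pvH_le (pvValid X) 0
  omega
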